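-- pv_equiv track=rewrite | github.com/0cyn/ktool | src/kswift/demangle.py | demangle
-- ===== SOURCE A (Python) =====
-- def demangle(name):
--     """
--     Very basic, very sloppy bare minimum POC for swift classname demangling
--
--     :param name:
--     :return:
--     """
--
--     project = ""
--     typename = ""
--     stage = 0
--     skip = False
--
--     for c in name:
--         if c.isdigit():
--             if skip:
--                 continue
--             else:
--                 stage += 1
--                 skip = True
--                 continue
--         else:
--             skip = False
--             if stage == 0:
--                 continue
--             elif stage == 1:
--                 project += c
--             elif stage == 2:
--                 typename += c
--
--     return project, typename
-- ===== SOURCE B (Python) =====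
-- from itertools import groupby
--
--
-- def demangle(name):
--     project = ""
--     typename = ""
--     stage = 0
--     for is_digit, run in groupby(name, key=str.isdigit):
--         if is_digit:
--             stage += 1
--         elif stage == 1:
--             project += ''.join(run)
--         elif stage == 2:
--             typename += ''.join(run)
--     return project, typename
-- ===== Notes on version B (the rewrite author's own statement) =====
-- stated objective: simpler
-- what changed: Replaced the char-by-char scan with skip/stage bookkeeping flags by an itertools.groupby pass over maximal digit/non-digit runs: each digit run bumps the stage, the runs after the first and second digit runs become project and typename.
import Mathlib
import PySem

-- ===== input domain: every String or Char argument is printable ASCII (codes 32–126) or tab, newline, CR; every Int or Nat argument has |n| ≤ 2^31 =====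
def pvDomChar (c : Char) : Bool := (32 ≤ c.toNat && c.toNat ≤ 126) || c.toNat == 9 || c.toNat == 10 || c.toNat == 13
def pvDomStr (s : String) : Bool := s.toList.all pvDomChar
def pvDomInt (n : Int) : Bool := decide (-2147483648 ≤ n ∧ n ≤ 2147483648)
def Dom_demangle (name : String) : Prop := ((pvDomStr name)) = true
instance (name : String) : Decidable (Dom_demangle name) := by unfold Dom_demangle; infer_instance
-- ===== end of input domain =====

-- B replaces A's char-by-char scan with skip/stage flags by a groupby-style pass over
-- maximal digit/non-digit runs (simpler decomposition; same return value).

-- ===== PORT A =====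
-- state: (project, typename, stage, skip)
def demangleStepA (st : List Char × List Char × Int × Bool) (c : Char) :
    List Char × List Char × Int × Bool :=
  if PySem.Chars.isdigit c then
    if st.2.2.2 then st
    else (st.1, st.2.1, st.2.2.1 + 1, true)
  else
    if st.2.2.1 == 0 then (st.1, st.2.1, st.2.2.1, false)
    else if st.2.2.1 == 1 then (st.1 ++ [c], st.2.1, st.2.2.1, false)
    else if st.2.2.1 == 2 then (st.1, st.2.1 ++ [c], st.2.2.1, false)
    else (st.1, st.2.1, st.2.2.1, false)

def demangle (name : String) : String × String :=
  let st := name.toList.foldl demangleStepA ([], [], 0, false)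
  (String.ofList st.1, String.ofList st.2.1)

-- ===== PORT B =====
-- itertools.groupby(name, key=str.isdigit): maximal runs tagged with the key
def demangleRuns : List Char → List (Bool × List Char)
  | [] => []
  | c :: cs =>
    let k := PySem.Chars.isdigit c
    (k, c :: cs.takeWhile (fun x => PySem.Chars.isdigit x == k)) ::
      demangleRuns (cs.dropWhile (fun x => PySem.Chars.isdigit x == k))
termination_by l => l.length
decreasing_by
  exact Nat.lt_succ_of_le (List.dropWhile_sublist _).length_le

-- state: (project, typename, stage)
def demangleStepB (st : List Char × List Char × Int) (r : Bool × List Char) :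
    List Char × List Char × Int :=
  if r.1 then (st.1, st.2.1, st.2.2 + 1)
  else if st.2.2 == 1 then (st.1 ++ r.2, st.2.1, st.2.2)
  else if st.2.2 == 2 then (st.1, st.2.1 ++ r.2, st.2.2)
  else st

def demangle_alt (name : String) : String × String :=
  let st := (demangleRuns name.toList).foldl demangleStepB ([], [], 0)
  (String.ofList st.1, String.ofList st.2.1)

-- ===== PRECONDITION & SPEC =====
def Spec_demangle (name : String) (out : String × String) : Prop := out = demangle_alt name
instance (name : String) (out : String × String) : Decidable (Spec_demangle name out) := by unfold Spec_demangle; infer_instance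

-- ===== CLAIM (what is proved, stated in full; the proofs are below) =====
def Claim_equal_demangle : Prop := ∀ (name : String), Dom_demangle name → Spec_demangle name (demangle name)

-- ===== LEMMAS AND PROOFS =====

-- the head of a non-empty dropWhile falsifies the predicate
lemma demangle_dropWhile_head_not {α : Type} (p : α → Bool) (l : List α) (d : α) (ds : List α)
    (h : l.dropWhile p = d :: ds) : p d = false := by
  have hne : l.dropWhile p ≠ [] := by simp [h]
  have := List.head_dropWhile_not p hne
  simpa [h] using this

-- a run of digits with skip already set leaves A's state unchanged
lemma foldA_digit_run (r : List Char) (h : ∀ x ∈ r, PySem.Chars.isdigit x = true)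
    (p t : List Char) (s : Int) :
    r.foldl demangleStepA (p, t, s, true) = (p, t, s, true) := by
  induction r with
  | nil => rfl
  | cons c r ih =>
    have hc : PySem.Chars.isdigit c = true := h c (List.mem_cons_self)
    simp only [List.foldl_cons, demangleStepA, hc, if_true]
    exact ih (fun x hx => h x (List.mem_cons_of_mem _ hx))

-- a run of non-digits appends to the stage-selected accumulator and clears skip
lemma foldA_nondigit_run (r : List Char) (h : ∀ x ∈ r, PySem.Chars.isdigit x = false)
    (p t : List Char) (s : Int) :
    r.foldl demangleStepA (p, t, s, false) =
      (if s == 1 then p ++ r else p, if s == 2 then t ++ r else t, s, false) := by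
  induction r generalizing p t with
  | nil => simp
  | cons c r ih =>
    have hc : PySem.Chars.isdigit c = false := h c (List.mem_cons_self)
    have h' : ∀ x ∈ r, PySem.Chars.isdigit x = false :=
      fun x hx => h x (List.mem_cons_of_mem _ hx)
    by_cases h1 : s = 1
    · subst h1; simp [List.foldl_cons, demangleStepA, hc, ih h']
    · by_cases h2 : s = 2
      · subst h2; simp [List.foldl_cons, demangleStepA, hc, ih h']
      · by_cases h0 : s = 0
        · subst h0; simp [List.foldl_cons, demangleStepA, hc, ih h']
        · simp [List.foldl_cons, demangleStepA, hc, ih h', h0, h1, h2]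

-- when the next char is not a digit (or the list is empty), the skip flag is irrelevant
-- up to the (project, typename, stage) projection
lemma foldA_skip_irrel (r : List Char)
    (h : r = [] ∨ ∃ c cs, r = c :: cs ∧ PySem.Chars.isdigit c = false)
    (p t : List Char) (s : Int) :
    ∃ sk, r.foldl demangleStepA (p, t, s, true) =
      ((r.foldl demangleStepA (p, t, s, false)).1,
       (r.foldl demangleStepA (p, t, s, false)).2.1,
       (r.foldl demangleStepA (p, t, s, false)).2.2.1, sk) := by
  rcases h with h | ⟨c, cs, rfl, hc⟩
  · subst h; exact ⟨true, rfl⟩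
  · refine ⟨(((c :: cs).foldl demangleStepA (p, t, s, false)).2.2.2), ?_⟩
    have hstep : demangleStepA (p, t, s, true) c = demangleStepA (p, t, s, false) c := by
      simp [demangleStepA, hc]
    simp [List.foldl_cons, hstep]

-- main invariant: A's fold from skip = false projects onto B's fold over the runs
lemma foldA_eq_foldB (l : List Char) (p t : List Char) (s : Int) :
    ∃ sk, l.foldl demangleStepA (p, t, s, false) =
      (((demangleRuns l).foldl demangleStepB (p, t, s)).1,
       ((demangleRuns l).foldl demangleStepB (p, t, s)).2.1,
       ((demangleRuns l).foldl demangleStepB (p, t, s)).2.2, sk) := by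
  induction hn : l.length using Nat.strong_induction_on generalizing l p t s with
  | _ n ih =>
    match l with
    | [] => exact ⟨false, by simp [demangleRuns]⟩
    | c :: cs =>
      subst hn
      obtain ⟨k, hk⟩ : ∃ k, PySem.Chars.isdigit c = k := ⟨_, rfl⟩
      obtain ⟨r, hr⟩ : ∃ r, cs.takeWhile (fun x => PySem.Chars.isdigit x == k) = r := ⟨_, rfl⟩
      obtain ⟨rest, hrest⟩ : ∃ u, cs.dropWhile (fun x => PySem.Chars.isdigit x == k) = u := ⟨_, rfl⟩
      have hsplit : cs = r ++ rest := by
        rw [← hr, ← hrest, List.takeWhile_append_dropWhile]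
      have hrall : ∀ x ∈ r, PySem.Chars.isdigit x = k := by
        intro x hx; rw [← hr] at hx
        simpa using List.mem_takeWhile_imp hx
      have hlen : rest.length < (c :: cs).length := by
        rw [← hrest]
        exact Nat.lt_succ_of_le (List.dropWhile_sublist _).length_le
      have hrestHead : ∀ d ds, rest = d :: ds → ¬ PySem.Chars.isdigit d = k := by
        intro d ds hre
        have hdd : (fun x => PySem.Chars.isdigit x == k) d = false :=
          demangle_dropWhile_head_not (fun x => PySem.Chars.isdigit x == k) cs d ds
            (hrest.trans hre)
        simpa using hdd
      have hruns : demangleRuns (c :: cs) = (k, c :: r) :: demangleRuns rest := by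
        rw [demangleRuns]
        simp only [hk, hr, hrest]
      have hA0 : (c :: cs).foldl demangleStepA (p, t, s, false)
          = rest.foldl demangleStepA ((c :: r).foldl demangleStepA (p, t, s, false)) := by
        conv_lhs => rw [show (c :: cs) = (c :: r) ++ rest by rw [List.cons_append, ← hsplit]]
        rw [List.foldl_append]
      rw [hruns, hA0]
      cases hkk : k with
      | true =>
        -- digit run: stage += 1
        have hin : (c :: r).foldl demangleStepA (p, t, s, false) = (p, t, s + 1, true) := by
          have hc : PySem.Chars.isdigit c = true := by rw [hk, hkk]
          rw [List.foldl_cons, show demangleStepA (p, t, s, false) c = (p, t, s + 1, true) by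
              simp [demangleStepA, hc],
            foldA_digit_run r (fun x hx => by rw [hrall x hx, hkk]) p t (s + 1)]
        have hB : demangleStepB (p, t, s) (true, c :: r) = (p, t, s + 1) := by
          simp [demangleStepB]
        rw [hin, List.foldl_cons, hB]
        have hrest' : rest = [] ∨ ∃ d ds, rest = d :: ds ∧ PySem.Chars.isdigit d = false := by
          match hre : rest with
          | [] => exact Or.inl rfl
          | d :: ds =>
            refine Or.inr ⟨d, ds, rfl, ?_⟩
            have := hrestHead d ds rfl
            rw [hkk] at this
            simpa using this
        obtain ⟨sk1, hsk1⟩ := foldA_skip_irrel rest hrest' p t (s + 1)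
        obtain ⟨sk2, hsk2⟩ := ih rest.length hlen rest p t (s + 1) rfl
        rw [hsk1, hsk2]
        exact ⟨sk1, rfl⟩
      | false =>
        -- non-digit run: append to the stage-selected accumulator
        have hall : ∀ x ∈ c :: r, PySem.Chars.isdigit x = false := by
          intro x hx
          rcases List.mem_cons.mp hx with rfl | hx
          · rw [hk, hkk]
          · rw [hrall x hx, hkk]
        have hB : demangleStepB (p, t, s) (false, c :: r) =
            (if s == 1 then p ++ (c :: r) else p, if s == 2 then t ++ (c :: r) else t, s) := by
          by_cases h1 : s = 1
          · subst h1; simp [demangleStepB]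
          · by_cases h2 : s = 2
            · subst h2; simp [demangleStepB]
            · simp [demangleStepB, beq_iff_eq, h1, h2]
        rw [foldA_nondigit_run (c :: r) hall p t s, List.foldl_cons, hB]
        exact ih rest.length hlen rest _ _ s rfl

-- ===== VERDICT (by name: the statement is the Claim_ definition above) =====
theorem demangle_spec : Claim_equal_demangle := by
  intro name _
  unfold Spec_demangle demangle demangle_alt
  obtain ⟨sk, h⟩ := foldA_eq_foldB name.toList [] [] 0
  rw [h]
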